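-- pv_equiv track=rewrite | github.com/Sudhansan5/InterviewBit-Solution-Python | Greedy Algorithm/bulbs.py | Solve
-- ===== SOURCE A (Python) =====
-- def Solve(A):
--     n=len(A)
--     count=0
--     orig=1
--     for i in range(n):
--         if A[i]==0:
--             if orig==1:
--                 count+=1
--                 orig=0
--         else:
--             if orig==0:
--                 count+=1
--                 orig=1
--     return count
-- ===== SOURCE B (Python) =====
-- def Solve(A):
--     # Run-skipping: count maximal runs of zeros (z); the answer is 2*z,
--     # minus 1 when the list ends in an (unclosed) zero run.
--     n = len(A)
--     z = 0
--     i = 0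
--     while i < n:
--         if A[i] == 0:
--             z += 1
--             while i < n and A[i] == 0:
--                 i += 1
--         else:
--             while i < n and A[i] != 0:
--                 i += 1
--     return 2 * z - (1 if A and A[-1] == 0 else 0)
-- ===== Notes on version B (the rewrite author's own statement) =====
-- stated objective: alternative
-- what changed: Replaces A's per-element flip-state simulation (count/orig state machine) by run-skipping: an outer loop consumes one maximal run of zeros or nonzeros per iteration, counts the zero runs z, and returns the closed formula 2*z - (1 if the list ends in a zero) instead of accumulating switches element by element.
import Mathlib
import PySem

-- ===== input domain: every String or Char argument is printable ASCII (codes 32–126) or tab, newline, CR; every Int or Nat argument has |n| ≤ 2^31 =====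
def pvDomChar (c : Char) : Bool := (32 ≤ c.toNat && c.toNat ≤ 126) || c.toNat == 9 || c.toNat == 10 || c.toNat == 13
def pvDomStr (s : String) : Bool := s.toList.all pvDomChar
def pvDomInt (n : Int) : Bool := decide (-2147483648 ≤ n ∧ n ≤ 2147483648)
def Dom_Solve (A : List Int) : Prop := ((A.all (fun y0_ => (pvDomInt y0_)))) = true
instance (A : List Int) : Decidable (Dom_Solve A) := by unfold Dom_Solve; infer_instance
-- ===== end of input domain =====

-- B replaces A's per-element flip-state simulation by run-skipping: it counts the
-- maximal runs of zeros z and returns 2*z minus 1 when the list ends in a zero run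
-- (alternative decomposition, same O(n) cost).

-- ===== PORT A =====
-- loop body of A; state is (count, orig)
def pvStepA (s : Int × Int) (x : Int) : Int × Int :=
  if x = 0 then
    (if s.2 = 1 then (s.1 + 1, 0) else s)
  else
    (if s.2 = 0 then (s.1 + 1, 1) else s)

def Solve (A : List Int) : Int :=
  (A.foldl pvStepA (0, 1)).1

-- ===== PORT B =====
-- Source B's outer while loop: each iteration consumes one maximal run
-- (the inner index-advancing 'while' loops are the dropWhile calls)
def pvZeroRuns : List Int → Int
  | [] => 0
  | x :: xs =>
    if x = 0 then 1 + pvZeroRuns (xs.dropWhile (fun y => y == 0))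
    else pvZeroRuns (xs.dropWhile (fun y => y != 0))
termination_by l => l.length
decreasing_by
  · exact Nat.lt_succ_of_le (List.length_dropWhile_le ..)
  · exact Nat.lt_succ_of_le (List.length_dropWhile_le ..)

-- 1 if A and A[-1] == 0 else 0
def pvLastZ (A : List Int) : Int :=
  match A.getLast? with
  | some v => if v = 0 then 1 else 0
  | none => 0

def Solve_alt (A : List Int) : Int :=
  2 * pvZeroRuns A - pvLastZ A

-- ===== PRECONDITION & SPEC =====
def Spec_Solve (A : List Int) (out : Int) : Prop := out = Solve_alt A
instance (A : List Int) (out : Int) : Decidable (Spec_Solve A out) := by unfold Spec_Solve; infer_instance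

-- ===== CLAIM (what is proved, stated in full; the proofs are below) =====
def Claim_equal_Solve : Prop := ∀ (A : List Int), Dom_Solve A → Spec_Solve A (Solve A)

-- ===== LEMMAS AND PROOFS =====
theorem pvZeros_noop (t : List Int) (c : Int) (h : ∀ x ∈ t, x = 0) :
    t.foldl pvStepA (c, 0) = (c, 0) := by
  induction t with
  | nil => rfl
  | cons x xs ih =>
    have hx := h x (by simp)
    simp [List.foldl_cons, pvStepA, hx]
    exact ih (fun y hy => h y (by simp [hy]))

theorem pvOnes_noop (t : List Int) (c : Int) (h : ∀ x ∈ t, x ≠ 0) :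
    t.foldl pvStepA (c, 1) = (c, 1) := by
  induction t with
  | nil => rfl
  | cons x xs ih =>
    have hx := h x (by simp)
    simp [List.foldl_cons, pvStepA, hx]
    exact ih (fun y hy => h y (by simp [hy]))

theorem pvLastZ_append (l₁ l₂ : List Int) (h : l₂ ≠ []) :
    pvLastZ (l₁ ++ l₂) = pvLastZ l₂ := by
  simp [pvLastZ, List.getLast?_append_of_ne_nil l₁ h]

theorem pvLastZ_all_zero (l : List Int) (h : ∀ x ∈ l, x = 0) (hne : l ≠ []) :
    pvLastZ l = 1 := by
  cases hl : l.getLast? with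
  | none => simp [List.getLast?_eq_none_iff.mp hl] at hne
  | some v =>
    have hv : v ∈ l := List.mem_of_getLast? hl
    simp [pvLastZ, hl, h v hv]

theorem pvLastZ_all_ne (l : List Int) (h : ∀ x ∈ l, x ≠ 0) : pvLastZ l = 0 := by
  cases hl : l.getLast? with
  | none => simp [pvLastZ, hl]
  | some v =>
    have hv : v ∈ l := List.mem_of_getLast? hl
    simp [pvLastZ, hl, h v hv]

-- the key invariant: from the 'bulb on' state the machine computes 2*(zero runs) - (ends in zero)
theorem pvMain : ∀ (n : Nat) (l : List Int), l.length ≤ n → ∀ c : Int,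
    l.foldl pvStepA (c, 1) = (c + 2 * pvZeroRuns l - pvLastZ l, 1 - pvLastZ l) := by
  intro n
  induction n with
  | zero =>
    intro l hl c
    have : l = [] := List.eq_nil_of_length_eq_zero (Nat.le_zero.mp hl)
    subst this; simp [pvZeroRuns, pvLastZ]
  | succ n ih =>
    intro l hl c
    cases l with
    | nil => simp [pvZeroRuns, pvLastZ]
    | cons x xs =>
      by_cases hx : x = 0
      · -- first element 0: count+1, orig := 0, then skip the zero run
        subst hx
        have hsplit : xs = xs.takeWhile (fun y => y == 0) ++ xs.dropWhile (fun y => y == 0) :=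
          (List.takeWhile_append_dropWhile (p := fun y => y == 0) (l := xs)).symm
        have hzeros : ∀ y ∈ xs.takeWhile (fun y => y == 0), y = 0 := by
          intro y hy
          simpa using List.mem_takeWhile_imp hy
        have hstep1 : List.foldl pvStepA (c, 1) (0 :: xs)
            = xs.foldl pvStepA (c + 1, 0) := by simp [pvStepA]
        rw [hstep1]
        conv_lhs => rw [hsplit]
        rw [List.foldl_append, pvZeros_noop _ _ hzeros]
        cases hd : xs.dropWhile (fun y => y == 0) with
        | nil =>
          -- whole list is zeros
          have hall : ∀ y ∈ xs, y = 0 := by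
            intro y hy
            have := (List.dropWhile_eq_nil_iff).mp hd
            simpa using this y hy
          have hallc : ∀ y ∈ (0 : Int) :: xs, y = 0 :=
            List.forall_mem_cons.mpr ⟨rfl, hall⟩
          have hlz : pvLastZ (0 :: xs) = 1 := pvLastZ_all_zero _ hallc (by simp)
          have hzr : pvZeroRuns (0 :: xs) = 1 := by
            simp [pvZeroRuns, hd]
          simp [hlz, hzr]; ring
        | cons y ys =>
          have hy : y ≠ 0 := by
            have h1 := List.head_dropWhile_not (p := fun y : Int => y == 0) (l := xs) (by simp [hd])
            rw [show (xs.dropWhile (fun y => y == 0)).head (by simp [hd]) = y from by simp [hd]] at h1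
            simpa using h1
          -- step on y: count+1, orig := 1, then skip the nonzero run
          have hstep2 : List.foldl pvStepA (c + 1, 0) (y :: ys)
              = ys.foldl pvStepA (c + 2, 1) := by
            simp [pvStepA, hy]; ring_nf
          have hsplit2 : ys = ys.takeWhile (fun y => y != 0) ++ ys.dropWhile (fun y => y != 0) :=
            (List.takeWhile_append_dropWhile (p := fun y => y != 0) (l := ys)).symm
          have hones : ∀ z ∈ ys.takeWhile (fun y => y != 0), z ≠ 0 := by
            intro z hz
            simpa using List.mem_takeWhile_imp hz
          have hlen : (ys.dropWhile (fun y => y != 0)).length ≤ n := by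
            have h1 : (ys.dropWhile (fun y => y != 0)).length ≤ ys.length := List.length_dropWhile_le ..
            have h2 : (y :: ys).length ≤ xs.length := by
              rw [← hd]; exact List.length_dropWhile_le ..
            simp at h2 hl; omega
          rw [hstep2]
          conv_lhs => rw [hsplit2]
          rw [List.foldl_append, pvOnes_noop _ _ hones, ih _ hlen]
          -- relate the run counts and last-element markers
          have hzr : pvZeroRuns (0 :: xs) = 1 + pvZeroRuns (ys.dropWhile (fun y => y != 0)) := by
            rw [show pvZeroRuns (0 :: xs) = 1 + pvZeroRuns (xs.dropWhile (fun y => y == 0)) by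
                  simp [pvZeroRuns], hd]
            simp [pvZeroRuns, hy]
          have hlz : pvLastZ (0 :: xs) = pvLastZ (ys.dropWhile (fun y => y != 0)) := by
            cases he : ys.dropWhile (fun y => y != 0) with
            | nil =>
              -- everything after the zero run is nonzero
              have hysall : ∀ z ∈ ys, z ≠ 0 := by
                intro z hz
                have := (List.dropWhile_eq_nil_iff).mp he
                simpa using this z hz
              have : pvLastZ (0 :: xs) = pvLastZ (y :: ys) := by
                conv_lhs => rw [hsplit, hd]
                rw [show (0 : Int) :: (xs.takeWhile (fun y => y == 0) ++ y :: ys)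
                      = ((0 : Int) :: xs.takeWhile (fun y => y == 0)) ++ (y :: ys) by simp]
                exact pvLastZ_append _ _ (by simp)
              have hnec : ∀ z ∈ y :: ys, z ≠ 0 := List.forall_mem_cons.mpr ⟨hy, hysall⟩
              rw [this, pvLastZ_all_ne (y :: ys) hnec]
              simp [pvLastZ]
            | cons e es =>
              conv_lhs => rw [hsplit, hd, hsplit2, he]
              rw [show (0 : Int) :: (xs.takeWhile (fun y => y == 0) ++ (y :: (ys.takeWhile (fun y => y != 0) ++ e :: es)))
                    = ((0 : Int) :: xs.takeWhile (fun y => y == 0) ++ y :: ys.takeWhile (fun y => y != 0)) ++ (e :: es) by simp]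
              rw [pvLastZ_append _ _ (by simp)]
          rw [hzr, hlz, Prod.mk.injEq]
          exact ⟨by ring, rfl⟩
      · -- first element nonzero: no-op, skip the nonzero run
        have hstep1 : List.foldl pvStepA (c, 1) (x :: xs)
            = xs.foldl pvStepA (c, 1) := by simp [pvStepA, hx]
        have hsplit : xs = xs.takeWhile (fun y => y != 0) ++ xs.dropWhile (fun y => y != 0) :=
          (List.takeWhile_append_dropWhile (p := fun y => y != 0) (l := xs)).symm
        have hones : ∀ z ∈ xs.takeWhile (fun y => y != 0), z ≠ 0 := by
          intro z hz
          simpa using List.mem_takeWhile_imp hz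
        have hlen : (xs.dropWhile (fun y => y != 0)).length ≤ n := by
          have h1 : (xs.dropWhile (fun y => y != 0)).length ≤ xs.length := List.length_dropWhile_le ..
          simp at hl; omega
        rw [hstep1]
        conv_lhs => rw [hsplit]
        rw [List.foldl_append, pvOnes_noop _ _ hones, ih _ hlen]
        have hzr : pvZeroRuns (x :: xs) = pvZeroRuns (xs.dropWhile (fun y => y != 0)) := by
          simp [pvZeroRuns, hx]
        have hlz : pvLastZ (x :: xs) = pvLastZ (xs.dropWhile (fun y => y != 0)) := by
          cases he : xs.dropWhile (fun y => y != 0) with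
          | nil =>
            have hxsall : ∀ z ∈ xs, z ≠ 0 := by
              intro z hz
              have := (List.dropWhile_eq_nil_iff).mp he
              simpa using this z hz
            have hnec : ∀ z ∈ x :: xs, z ≠ 0 := List.forall_mem_cons.mpr ⟨hx, hxsall⟩
            rw [pvLastZ_all_ne (x :: xs) hnec]
            simp [pvLastZ]
          | cons e es =>
            conv_lhs => rw [hsplit, he]
            rw [show x :: (xs.takeWhile (fun y => y != 0) ++ e :: es)
                  = (x :: xs.takeWhile (fun y => y != 0)) ++ (e :: es) by simp]
            exact pvLastZ_append _ _ (by simp)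
        rw [hzr, hlz]

-- ===== VERDICT (by name: the statement is the Claim_ definition above) =====
theorem Solve_spec : Claim_equal_Solve := by
  intro A _
  unfold Spec_Solve Solve Solve_alt
  rw [pvMain A.length A le_rfl 0]
  ring_nf
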